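-- pv_equiv track=rewrite | github.com/CUKbab/CUK_Menu | pdf_parser.py | parse_second_restaurant_menu
-- ===== SOURCE A (Python) =====
-- def parse_second_restaurant_menu(text):
--     """
--     Parses the cleaned text to allocate menu items to Morning, Lunch, and Dinner
--     for 5 days a week, ensuring Morning menus cycle every 4 times (Monday to Thursday)
--     and Lunch/Dinner menus cycle every 5 times (Monday to Friday).
--
--     Args:
--         text (str): The cleaned text extracted from the PDF.
--
--     Returns:
--         dict: A dictionary containing the parsed menu data, structured as follows:
--               {
--                   "Morning": {
--                       "월": ["item1", "item2", ...],
--                       "화": [...],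
--                       ...
--                   },
--                   "Lunch": { ... },
--                   "Dinner": { ... }
--               }
--     """
--     menu_data = {"Lunch": {}, "Dinner": {}}
--     days_of_week = ["Mon", "Tue", "Wed", "Thu", "Fri"]
--
--     # Initialize menu entries for each day and each meal
--     for meal in menu_data:
--         for day in days_of_week:
--             menu_data[meal][day] = []
--
--     # Combine all menu items into a single list
--     menu_items = " ".join(text.strip().split('\n')).split()
--
--     # Helper function to distribute menu items across meals and days
--     def distribute_menu_items(menu_items):
--         lunch_day_index = 0  # Index for Lunch and Dinner (cycles every 5 days: Mon-Fri)
--         dinner_day_index = 0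
--         current_meal = "Lunch"  # Start with Lunch
--
--         # Iterate through the menu items and distribute them
--         for i, item in enumerate(menu_items):
--             if current_meal == "Lunch":
--                 #i+=1
--                 # Fill Lunch menus (cycle every 5 days: Mon-Fri)
--                 lunch_day_index = i % 5 # Cycle through 4 days (Mon-Thu)
--                 menu_data["Lunch"][days_of_week[lunch_day_index]].append(item)
--                 # Switch to Dinner after filling 30 Lunch items (6 items * 5 days)
--                 if i == 35: # 7 items * 5 days = 35 items
--                     current_meal = "Dinner"
--                 continue
--
--             if current_meal == "Dinner":
--                 i+=1
--                 dinner_day_index = i % 5 # Cycle through 5 days (Mon-Fri)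
--                 menu_data["Dinner"][days_of_week[dinner_day_index]].append(item)
--
--     # Distribute menu items
--     distribute_menu_items(menu_items)
--
--     return menu_data
-- ===== SOURCE B (Python) =====
-- def bucket(xs, off, d):
--     return [x for i, x in enumerate(xs) if (i + off) % 5 == d]
--
--
-- def parse_second_restaurant_menu(text):
--     days = ["Mon", "Tue", "Wed", "Thu", "Fri"]
--     items = " ".join(text.strip().split('\n')).split()
--     lunch, dinner = items[:36], items[36:]
--     return {
--         "Lunch": {day: bucket(lunch, 0, d) for d, day in enumerate(days)},
--         "Dinner": {day: bucket(dinner, 2, d) for d, day in enumerate(days)},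
--     }
-- ===== Notes on version B (the rewrite author's own statement) =====
-- stated objective: simpler
-- what changed: Replaced A's item-major scatter (one stateful loop mutating nested dicts via a current_meal flag, i==35 switch and i+=1 offset) by a bucket-major gather: the result dict is built directly as comprehensions, each day's list collected by one filtered pass over the enumerated lunch/dinner slice.
import Mathlib
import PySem

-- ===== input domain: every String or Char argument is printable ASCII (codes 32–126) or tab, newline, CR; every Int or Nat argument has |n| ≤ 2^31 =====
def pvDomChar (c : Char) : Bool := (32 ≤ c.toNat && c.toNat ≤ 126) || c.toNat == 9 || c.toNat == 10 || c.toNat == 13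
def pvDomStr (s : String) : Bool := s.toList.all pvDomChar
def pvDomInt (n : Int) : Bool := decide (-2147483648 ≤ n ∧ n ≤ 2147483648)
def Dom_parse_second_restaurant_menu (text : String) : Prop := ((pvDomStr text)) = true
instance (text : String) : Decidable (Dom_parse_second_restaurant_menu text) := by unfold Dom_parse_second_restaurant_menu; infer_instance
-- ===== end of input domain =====

-- B replaces A's item-major stateful scatter loop (current_meal flag, i==35 switch, i+=1 offset)
-- by a bucket-major gather: the output dict is built directly, each day's list collected by one
-- filtered pass over the enumerated slice (objective: simpler, no mutable dict state).


-- ===== PORT A =====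
def pvDays : List String := ["Mon", "Tue", "Wed", "Thu", "Fri"]

-- menu_data[meal][day].append(item) (keys are always present, so `modify` with a default is exact)
def pvAppend (md : PySem.Dict String (PySem.Dict String (List String))) (meal : String) (i : Int)
    (item : String) : PySem.Dict String (PySem.Dict String (List String)) :=
  md.modify meal PySem.Dict.empty (fun inner =>
    inner.modify (PySem.List.pyGetD pvDays i "") [] (fun l => l ++ [item]))

-- the initialization loops: for meal in menu_data: for day in days_of_week: menu_data[meal][day] = []
def pvInitA : PySem.Dict String (PySem.Dict String (List String)) :=
  (["Lunch", "Dinner"]).foldl (fun md meal =>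
      pvDays.foldl (fun md day => md.modify meal PySem.Dict.empty (fun inner => inner.insert day [])) md)
    ((PySem.Dict.empty.insert "Lunch" PySem.Dict.empty).insert "Dinner" PySem.Dict.empty)

-- distribute_menu_items: the loop over enumerate(menu_items) with the current_meal flag
def pvGoA : List String → Int → String →
    PySem.Dict String (PySem.Dict String (List String)) → PySem.Dict String (PySem.Dict String (List String))
  | [], _, _, md => md
  | item :: rest, i, meal, md =>
    if meal == "Lunch" then
      pvGoA rest (i + 1) (if i == 35 then "Dinner" else meal)
        (pvAppend md "Lunch" (PySem.Int.mod i 5) item)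
    else if meal == "Dinner" then
      pvGoA rest (i + 1) meal (pvAppend md "Dinner" (PySem.Int.mod (i + 1) 5) item)
    else pvGoA rest (i + 1) meal md

-- " ".join(text.strip().split('\n')).split(); the separator "\n" is non-empty, so split? is always some
def pvTokens (text : String) : List String :=
  PySem.Str.split₀ (PySem.Str.join " " ((PySem.Str.split? (PySem.Str.strip text) "\n").getD []))

def parse_second_restaurant_menu (text : String) : List (String × List (String × List String)) :=
  let menu_items := pvTokens text
  let md := pvGoA menu_items 0 "Lunch" pvInitA
  md.items.map (fun p => (p.1, p.2.items))

-- ===== PORT B =====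
-- bucket(xs, off, d) = [x for i, x in enumerate(xs) if (i + off) % 5 == d]
def pvBucket (xs : List String) (off d : Int) : List String :=
  ((PySem.List.enumerate xs 0).filter (fun p => PySem.Int.mod (p.1 + off) 5 == d)).map (·.2)

-- the returned dict literal with its two dict comprehensions over enumerate(days)
def parse_second_restaurant_menu_alt (text : String) : List (String × List (String × List String)) :=
  let items := pvTokens text
  let lunch := PySem.List.slice items none (some 36)
  let dinner := PySem.List.slice items (some 36) none
  [("Lunch", (PySem.List.enumerate pvDays 0).map (fun p => (p.2, pvBucket lunch 0 p.1))),
   ("Dinner", (PySem.List.enumerate pvDays 0).map (fun p => (p.2, pvBucket dinner 2 p.1)))]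

-- ===== PRECONDITION & SPEC =====
def Spec_parse_second_restaurant_menu (text : String) (out : List (String × List (String × List String))) : Prop := out = parse_second_restaurant_menu_alt text
instance (text : String) (out : List (String × List (String × List String))) : Decidable (Spec_parse_second_restaurant_menu text out) := by unfold Spec_parse_second_restaurant_menu; infer_instance

-- ===== CLAIM (what is proved, stated in full; the proofs are below) =====
def Claim_equal_parse_second_restaurant_menu : Prop := ∀ (text : String), Dom_parse_second_restaurant_menu text → Spec_parse_second_restaurant_menu text (parse_second_restaurant_menu text)

-- ===== LEMMAS AND PROOFS =====

-- staged scatter: A's single loop split at the fixed boundary (proof-only helpers)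
def pvLunchB : List String → Int →
    PySem.Dict String (PySem.Dict String (List String)) → PySem.Dict String (PySem.Dict String (List String))
  | [], _, md => md
  | item :: rest, j, md => pvLunchB rest (j + 1) (pvAppend md "Lunch" (PySem.Int.mod j 5) item)

def pvDinnerB : List String → Int →
    PySem.Dict String (PySem.Dict String (List String)) → PySem.Dict String (PySem.Dict String (List String))
  | [], _, md => md
  | item :: rest, j, md => pvDinnerB rest (j + 1) (pvAppend md "Dinner" (PySem.Int.mod (j + 2) 5) item)

-- a fully concrete dict state: the two meals with their five day buckets
def mdOf (a0 a1 a2 a3 a4 b0 b1 b2 b3 b4 : List String) : PySem.Dict String (PySem.Dict String (List String)) :=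
  PySem.Dict.mk [("Lunch", PySem.Dict.mk [("Mon",a0),("Tue",a1),("Wed",a2),("Thu",a3),("Fri",a4)]),
                 ("Dinner", PySem.Dict.mk [("Mon",b0),("Tue",b1),("Wed",b2),("Thu",b3),("Fri",b4)])]

-- elements of xs at positions k (counting from j) with (k + off) % 5 = d
def pickGen (off : Nat) : List String → Nat → Nat → List String
  | [], _, _ => []
  | x :: xs, j, d => (if (j + off) % 5 = d then [x] else []) ++ pickGen off xs (j+1) d

theorem pymod5 (j : Nat) : PySem.Int.mod (j : Int) 5 = ((j % 5 : Nat) : Int) := by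
  rw [PySem.Int.mod_eq_emod_of_pos (by norm_num)]
  omega

theorem pvDinner_eq (r : List String) : ∀ (j : Int) md,
    pvGoA r (j + 36) "Dinner" md = pvDinnerB r j md := by
  induction r with
  | nil => intro j md; simp [pvGoA, pvDinnerB]
  | cons x r ih =>
    intro j md
    have h5 : PySem.Int.mod (j + 36 + 1) 5 = PySem.Int.mod (j + 2) 5 := by
      rw [PySem.Int.mod_eq_emod_of_pos (by norm_num), PySem.Int.mod_eq_emod_of_pos (by norm_num)]
      omega
    have hj : j + 36 + 1 = (j + 1) + 36 := by ring
    simp only [pvGoA, pvDinnerB]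
    rw [if_neg (by decide), if_pos (by decide), h5, hj, ih]

theorem pvLunch_eq (r : List String) : ∀ (n : Nat) md, n ≤ 35 →
    pvGoA r (n : Int) "Lunch" md
      = pvDinnerB (r.drop (36 - n)) 0 (pvLunchB (r.take (36 - n)) (n : Int) md) := by
  induction r with
  | nil => intro n md _; simp [pvGoA, pvLunchB, pvDinnerB]
  | cons x r ih =>
    intro n md hn
    by_cases h35 : n = 35
    · subst h35
      have h36 : ((35 : Nat) : Int) + 1 = (0 : Int) + 36 := by norm_num
      simp only [pvGoA]
      norm_num
      simpa using pvDinner_eq r 0 (pvAppend md "Lunch" (PySem.Int.mod 35 5) x)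
    · have hlt : n < 35 := lt_of_le_of_ne hn h35
      have hne : ((n : Nat) : Int) ≠ 35 := by omega
      have hk : 36 - n = (36 - (n + 1)) + 1 := by omega
      have hcast : ((n : Nat) : Int) + 1 = ((n + 1 : Nat) : Int) := by push_cast; ring
      rw [hk]
      simp only [pvGoA, pvLunchB, List.take_succ_cons, List.drop_succ_cons, beq_self_eq_true,
        if_true]
      rw [if_neg (by simpa using hne), hcast, ih (n + 1) _ (by omega)]

theorem pvMain (items : List String) (md : PySem.Dict String (PySem.Dict String (List String))) :
    pvGoA items 0 "Lunch" md
      = pvDinnerB (PySem.List.slice items (some 36) none) 0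
          (pvLunchB (PySem.List.slice items none (some 36)) 0 md) := by
  have h := pvLunch_eq items 0 md (by omega)
  simp only [Nat.cast_zero, Nat.sub_zero] at h
  rw [h, PySem.List.slice_to items (by norm_num : (0:Int) ≤ 36),
    PySem.List.slice_from items (by norm_num : (0:Int) ≤ 36)]
  simp

theorem pvAppL0 (a0 a1 a2 a3 a4 b0 b1 b2 b3 b4 : List String) (x : String) :
    pvAppend (mdOf a0 a1 a2 a3 a4 b0 b1 b2 b3 b4) "Lunch" 0 x
      = mdOf (a0 ++ [x]) a1 a2 a3 a4 b0 b1 b2 b3 b4 := by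
  simp [pvAppend, mdOf, PySem.Dict.modify, PySem.Dict.insert, PySem.Dict.getD,
    PySem.Dict.get?, PySem.Dict.contains, PySem.List.pyGetD, PySem.List.pyGet?,
    PySem.List.pyIdx?, pvDays]

theorem pvAppL1 (a0 a1 a2 a3 a4 b0 b1 b2 b3 b4 : List String) (x : String) :
    pvAppend (mdOf a0 a1 a2 a3 a4 b0 b1 b2 b3 b4) "Lunch" 1 x
      = mdOf a0 (a1 ++ [x]) a2 a3 a4 b0 b1 b2 b3 b4 := by
  simp [pvAppend, mdOf, PySem.Dict.modify, PySem.Dict.insert, PySem.Dict.getD,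
    PySem.Dict.get?, PySem.Dict.contains, PySem.List.pyGetD, PySem.List.pyGet?,
    PySem.List.pyIdx?, pvDays]

theorem pvAppL2 (a0 a1 a2 a3 a4 b0 b1 b2 b3 b4 : List String) (x : String) :
    pvAppend (mdOf a0 a1 a2 a3 a4 b0 b1 b2 b3 b4) "Lunch" 2 x
      = mdOf a0 a1 (a2 ++ [x]) a3 a4 b0 b1 b2 b3 b4 := by
  simp [pvAppend, mdOf, PySem.Dict.modify, PySem.Dict.insert, PySem.Dict.getD,
    PySem.Dict.get?, PySem.Dict.contains, PySem.List.pyGetD, PySem.List.pyGet?,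
    PySem.List.pyIdx?, pvDays]

theorem pvAppL3 (a0 a1 a2 a3 a4 b0 b1 b2 b3 b4 : List String) (x : String) :
    pvAppend (mdOf a0 a1 a2 a3 a4 b0 b1 b2 b3 b4) "Lunch" 3 x
      = mdOf a0 a1 a2 (a3 ++ [x]) a4 b0 b1 b2 b3 b4 := by
  simp [pvAppend, mdOf, PySem.Dict.modify, PySem.Dict.insert, PySem.Dict.getD,
    PySem.Dict.get?, PySem.Dict.contains, PySem.List.pyGetD, PySem.List.pyGet?,
    PySem.List.pyIdx?, pvDays]

theorem pvAppL4 (a0 a1 a2 a3 a4 b0 b1 b2 b3 b4 : List String) (x : String) :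
    pvAppend (mdOf a0 a1 a2 a3 a4 b0 b1 b2 b3 b4) "Lunch" 4 x
      = mdOf a0 a1 a2 a3 (a4 ++ [x]) b0 b1 b2 b3 b4 := by
  simp [pvAppend, mdOf, PySem.Dict.modify, PySem.Dict.insert, PySem.Dict.getD,
    PySem.Dict.get?, PySem.Dict.contains, PySem.List.pyGetD, PySem.List.pyGet?,
    PySem.List.pyIdx?, pvDays]

theorem pvAppD0 (a0 a1 a2 a3 a4 b0 b1 b2 b3 b4 : List String) (x : String) :
    pvAppend (mdOf a0 a1 a2 a3 a4 b0 b1 b2 b3 b4) "Dinner" 0 x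
      = mdOf a0 a1 a2 a3 a4 (b0 ++ [x]) b1 b2 b3 b4 := by
  simp [pvAppend, mdOf, PySem.Dict.modify, PySem.Dict.insert, PySem.Dict.getD,
    PySem.Dict.get?, PySem.Dict.contains, PySem.List.pyGetD, PySem.List.pyGet?,
    PySem.List.pyIdx?, pvDays]

theorem pvAppD1 (a0 a1 a2 a3 a4 b0 b1 b2 b3 b4 : List String) (x : String) :
    pvAppend (mdOf a0 a1 a2 a3 a4 b0 b1 b2 b3 b4) "Dinner" 1 x
      = mdOf a0 a1 a2 a3 a4 b0 (b1 ++ [x]) b2 b3 b4 := by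
  simp [pvAppend, mdOf, PySem.Dict.modify, PySem.Dict.insert, PySem.Dict.getD,
    PySem.Dict.get?, PySem.Dict.contains, PySem.List.pyGetD, PySem.List.pyGet?,
    PySem.List.pyIdx?, pvDays]

theorem pvAppD2 (a0 a1 a2 a3 a4 b0 b1 b2 b3 b4 : List String) (x : String) :
    pvAppend (mdOf a0 a1 a2 a3 a4 b0 b1 b2 b3 b4) "Dinner" 2 x
      = mdOf a0 a1 a2 a3 a4 b0 b1 (b2 ++ [x]) b3 b4 := by
  simp [pvAppend, mdOf, PySem.Dict.modify, PySem.Dict.insert, PySem.Dict.getD,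
    PySem.Dict.get?, PySem.Dict.contains, PySem.List.pyGetD, PySem.List.pyGet?,
    PySem.List.pyIdx?, pvDays]

theorem pvAppD3 (a0 a1 a2 a3 a4 b0 b1 b2 b3 b4 : List String) (x : String) :
    pvAppend (mdOf a0 a1 a2 a3 a4 b0 b1 b2 b3 b4) "Dinner" 3 x
      = mdOf a0 a1 a2 a3 a4 b0 b1 b2 (b3 ++ [x]) b4 := by
  simp [pvAppend, mdOf, PySem.Dict.modify, PySem.Dict.insert, PySem.Dict.getD,
    PySem.Dict.get?, PySem.Dict.contains, PySem.List.pyGetD, PySem.List.pyGet?,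
    PySem.List.pyIdx?, pvDays]

theorem pvAppD4 (a0 a1 a2 a3 a4 b0 b1 b2 b3 b4 : List String) (x : String) :
    pvAppend (mdOf a0 a1 a2 a3 a4 b0 b1 b2 b3 b4) "Dinner" 4 x
      = mdOf a0 a1 a2 a3 a4 b0 b1 b2 b3 (b4 ++ [x]) := by
  simp [pvAppend, mdOf, PySem.Dict.modify, PySem.Dict.insert, PySem.Dict.getD,
    PySem.Dict.get?, PySem.Dict.contains, PySem.List.pyGetD, PySem.List.pyGet?,
    PySem.List.pyIdx?, pvDays]

-- cast arithmetic for Python's % on nonneg ints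
theorem pymod5add (j c : Nat) : PySem.Int.mod ((j : Int) + (c : Int)) 5 = (((j + c) % 5 : Nat) : Int) := by
  rw [PySem.Int.mod_eq_emod_of_pos (by norm_num)]
  omega

-- scatter on the concrete state appends each item to the bucket its index selects
theorem lunch_mdOf (xs : List String) : ∀ (j : Nat) (a0 a1 a2 a3 a4 b0 b1 b2 b3 b4 : List String),
    pvLunchB xs (j : Int) (mdOf a0 a1 a2 a3 a4 b0 b1 b2 b3 b4)
      = mdOf (a0 ++ pickGen 0 xs j 0) (a1 ++ pickGen 0 xs j 1) (a2 ++ pickGen 0 xs j 2)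
             (a3 ++ pickGen 0 xs j 3) (a4 ++ pickGen 0 xs j 4) b0 b1 b2 b3 b4 := by
  induction xs with
  | nil => intro j a0 a1 a2 a3 a4 b0 b1 b2 b3 b4; simp [pvLunchB, pickGen]
  | cons x xs ih =>
    intro j a0 a1 a2 a3 a4 b0 b1 b2 b3 b4
    have hcast : (j : Int) + 1 = ((j + 1 : Nat) : Int) := by push_cast; ring
    simp only [pvLunchB, pymod5 j]
    have h5 : j % 5 < 5 := Nat.mod_lt _ (by norm_num)
    interval_cases h : j % 5
    · rw [Nat.cast_zero, pvAppL0, hcast, ih]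
      simp [pickGen, h, List.append_assoc]
    · rw [Nat.cast_one, pvAppL1, hcast, ih]
      simp [pickGen, h, List.append_assoc]
    · rw [Nat.cast_ofNat, pvAppL2, hcast, ih]
      simp [pickGen, h, List.append_assoc]
    · rw [Nat.cast_ofNat, pvAppL3, hcast, ih]
      simp [pickGen, h, List.append_assoc]
    · rw [Nat.cast_ofNat, pvAppL4, hcast, ih]
      simp [pickGen, h, List.append_assoc]

theorem dinner_mdOf (xs : List String) : ∀ (j : Nat) (a0 a1 a2 a3 a4 b0 b1 b2 b3 b4 : List String),
    pvDinnerB xs (j : Int) (mdOf a0 a1 a2 a3 a4 b0 b1 b2 b3 b4)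
      = mdOf a0 a1 a2 a3 a4 (b0 ++ pickGen 2 xs j 0) (b1 ++ pickGen 2 xs j 1) (b2 ++ pickGen 2 xs j 2)
             (b3 ++ pickGen 2 xs j 3) (b4 ++ pickGen 2 xs j 4) := by
  induction xs with
  | nil => intro j a0 a1 a2 a3 a4 b0 b1 b2 b3 b4; simp [pvDinnerB, pickGen]
  | cons x xs ih =>
    intro j a0 a1 a2 a3 a4 b0 b1 b2 b3 b4
    have hcast : (j : Int) + 1 = ((j + 1 : Nat) : Int) := by push_cast; ring
    have hm : PySem.Int.mod ((j : Int) + 2) 5 = (((j + 2) % 5 : Nat) : Int) := by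
      have := pymod5add j 2; push_cast at this ⊢; omega
    simp only [pvDinnerB, hm]
    have h5 : (j + 2) % 5 < 5 := Nat.mod_lt _ (by norm_num)
    interval_cases h : (j + 2) % 5
    · rw [Nat.cast_zero, pvAppD0, hcast, ih]
      simp [pickGen, h, List.append_assoc]
    · rw [Nat.cast_one, pvAppD1, hcast, ih]
      simp [pickGen, h, List.append_assoc]
    · rw [Nat.cast_ofNat, pvAppD2, hcast, ih]
      simp [pickGen, h, List.append_assoc]
    · rw [Nat.cast_ofNat, pvAppD3, hcast, ih]
      simp [pickGen, h, List.append_assoc]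
    · rw [Nat.cast_ofNat, pvAppD4, hcast, ih]
      simp [pickGen, h, List.append_assoc]

-- B's filtered pass over enumerate equals the positional pick
theorem bucket_eq (xs : List String) : ∀ (s off d : Nat),
    ((PySem.List.enumerate xs (s : Int)).filter
        (fun p => PySem.Int.mod (p.1 + (off : Int)) 5 == (d : Int))).map (·.2)
      = pickGen off xs s d := by
  induction xs with
  | nil => intro s off d; simp [PySem.List.enumerate_nil, pickGen]
  | cons x xs ih =>
    intro s off d
    have hcast : (s : Int) + 1 = ((s + 1 : Nat) : Int) := by push_cast; ring
    rw [PySem.List.enumerate_cons]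
    by_cases h : (s + off) % 5 = d
    · rw [List.filter_cons_of_pos (by simp; omega)]
      simp only [List.map_cons, hcast, ih]
      simp [pickGen, h]
    · rw [List.filter_cons_of_neg (by simp; omega)]
      rw [hcast, ih]
      simp [pickGen, h]

theorem pvInit_mdOf : pvInitA = mdOf [] [] [] [] [] [] [] [] [] [] := by decide

-- ===== VERDICT (by name: the statement is the Claim_ definition above) =====
theorem parse_second_restaurant_menu_spec : Claim_equal_parse_second_restaurant_menu := by
  intro text _
  unfold Spec_parse_second_restaurant_menu
  simp only [parse_second_restaurant_menu, parse_second_restaurant_menu_alt]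
  rw [pvMain, pvInit_mdOf]
  rw [show (0 : Int) = ((0 : Nat) : Int) from rfl, lunch_mdOf, dinner_mdOf]
  have hl := fun d => bucket_eq (PySem.List.slice (pvTokens text) none (some 36)) 0 0 d
  have hd := fun d => bucket_eq (PySem.List.slice (pvTokens text) (some 36) none) 0 2 d
  simp only [Nat.cast_zero] at hl hd
  simp [mdOf, pvBucket, pvDays, PySem.List.enumerate_cons, PySem.List.enumerate_nil,
    ← hl 0, ← hl 1, ← hl 2, ← hl 3, ← hl 4, ← hd 0, ← hd 1, ← hd 2, ← hd 3, ← hd 4]
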